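-- pv_equiv track=rewrite | github.com/Tercyus/RC-PR | RP2040 Pantalla 128x64/code.py | _timegm
-- ===== SOURCE A (Python) =====
-- def _timegm(año, mes, dia, hora, minuto, seg):
--     """Convierte fecha UTC a timestamp Unix (reemplaza calendar.timegm)."""
--     dias_mes = (0, 31, 28, 31, 30, 31, 30, 31, 31, 30, 31, 30, 31)
--     dias = (año - 1970) * 365
--     dias += (año - 1969) // 4 - (año - 1901) // 100 + (año - 1601) // 400
--     for m in range(1, mes):
--         dias += dias_mes[m]
--     if mes > 2 and (año % 4 == 0 and (año % 100 != 0 or año % 400 == 0)):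
--         dias += 1
--     dias += dia - 1
--     return dias * 86400 + hora * 3600 + minuto * 60 + seg
-- ===== SOURCE B (Python) =====
-- def _dias_antes_del_anno(y):
--     """Dias desde el 1 de enero del anno 1 (proleptico gregoriano) hasta el 1 de enero de y."""
--     y -= 1
--     return y * 365 + y // 4 - y // 100 + y // 400
--
--
-- def _timegm(a_o, mes, dia, hora, minuto, seg):
--     """Convierte fecha UTC a timestamp Unix via conteo de dias desde el anno 1."""
--     dias = _dias_antes_del_anno(a_o) - _dias_antes_del_anno(1970)
--     if mes > 1:
--         # formula aritmetica del dia-del-anno: dias antes del mes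
--         dias += (367 * mes - 362) // 12
--         if mes > 2:
--             es_bisiesto = a_o % 4 == 0 and (a_o % 100 != 0 or a_o % 400 == 0)
--             dias -= 1 if es_bisiesto else 2
--     dias += dia - 1
--     return dias * 86400 + hora * 3600 + minuto * 60 + seg
-- ===== Notes on version B (the rewrite author's own statement) =====
-- stated objective: alternative
-- what changed: B counts days since year 1 with a days-before-year helper (365*y + y//4 - y//100 + y//400 with y = year-1, differenced against 1970) and replaces the per-month table loop by the arithmetic day-of-year formula (367*mes - 362)//12 with a 1/2-day leap correction, instead of A's epoch-anchored leap expressions and month-summing loop.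
import Mathlib
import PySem

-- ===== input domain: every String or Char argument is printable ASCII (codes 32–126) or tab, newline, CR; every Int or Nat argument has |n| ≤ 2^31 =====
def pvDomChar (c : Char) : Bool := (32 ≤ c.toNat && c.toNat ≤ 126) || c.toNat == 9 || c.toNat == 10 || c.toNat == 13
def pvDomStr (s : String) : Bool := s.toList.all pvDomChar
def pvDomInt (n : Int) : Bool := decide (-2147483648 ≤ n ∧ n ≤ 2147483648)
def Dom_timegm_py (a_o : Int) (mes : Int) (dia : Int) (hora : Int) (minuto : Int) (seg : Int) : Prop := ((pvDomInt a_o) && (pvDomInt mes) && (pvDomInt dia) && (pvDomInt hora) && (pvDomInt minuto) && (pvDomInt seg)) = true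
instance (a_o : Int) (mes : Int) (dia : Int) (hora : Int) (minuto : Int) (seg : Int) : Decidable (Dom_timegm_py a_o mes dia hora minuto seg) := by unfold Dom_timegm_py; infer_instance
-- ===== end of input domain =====

-- B counts days since year 1 (days-before-year helper differenced against 1970) and uses the
-- arithmetic day-of-year formula (367*mes-362)//12 instead of A's month-summing loop (objective: alternative).

-- ===== PORT A =====
def timegm_py (a_o : Int) (mes : Int) (dia : Int) (hora : Int) (minuto : Int) (seg : Int) : Int :=
  let dias_mes : List Int := [0, 31, 28, 31, 30, 31, 30, 31, 31, 30, 31, 30, 31]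
  let dias := (a_o - 1970) * 365
  let dias := dias + (PySem.Int.floordiv (a_o - 1969) 4 - PySem.Int.floordiv (a_o - 1901) 100 + PySem.Int.floordiv (a_o - 1601) 400)
  let dias := (PySem.List.pyRange 1 mes 1).foldl (fun d m => d + PySem.List.pyGetD dias_mes m 0) dias
  let dias := if mes > 2 ∧ (PySem.Int.mod a_o 4 = 0 ∧ (PySem.Int.mod a_o 100 ≠ 0 ∨ PySem.Int.mod a_o 400 = 0)) then dias + 1 else dias
  let dias := dias + (dia - 1)
  dias * 86400 + hora * 3600 + minuto * 60 + seg

-- ===== PORT B =====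
def dias_antes_del_anno (y : Int) : Int :=
  let y := y - 1
  y * 365 + PySem.Int.floordiv y 4 - PySem.Int.floordiv y 100 + PySem.Int.floordiv y 400

def timegm_py_alt (a_o : Int) (mes : Int) (dia : Int) (hora : Int) (minuto : Int) (seg : Int) : Int :=
  let dias := dias_antes_del_anno a_o - dias_antes_del_anno 1970
  let dias :=
    if mes > 1 then
      let dias := dias + PySem.Int.floordiv (367 * mes - 362) 12
      if mes > 2 then
        let es_bisiesto := PySem.Int.mod a_o 4 = 0 ∧ (PySem.Int.mod a_o 100 ≠ 0 ∨ PySem.Int.mod a_o 400 = 0)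
        dias - (if es_bisiesto then 1 else 2)
      else dias
    else dias
  let dias := dias + (dia - 1)
  dias * 86400 + hora * 3600 + minuto * 60 + seg

-- ===== PRECONDITION & SPEC =====
-- Pre_ excludes mes ≥ 14, where A's month-table lookup raises IndexError.
def Pre_timegm_py (a_o : Int) (mes : Int) (dia : Int) (hora : Int) (minuto : Int) (seg : Int) : Prop := mes ≤ 13
instance (a_o : Int) (mes : Int) (dia : Int) (hora : Int) (minuto : Int) (seg : Int) : Decidable (Pre_timegm_py a_o mes dia hora minuto seg) := by unfold Pre_timegm_py; infer_instance
def pvWitness_timegm_py : Int × Int × Int × Int × Int × Int := (2024, 6, 15, 12, 30, 45)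

def Spec_timegm_py (a_o : Int) (mes : Int) (dia : Int) (hora : Int) (minuto : Int) (seg : Int) (out : Int) : Prop := out = timegm_py_alt a_o mes dia hora minuto seg
instance (a_o : Int) (mes : Int) (dia : Int) (hora : Int) (minuto : Int) (seg : Int) (out : Int) : Decidable (Spec_timegm_py a_o mes dia hora minuto seg out) := by unfold Spec_timegm_py; infer_instance

-- ===== CLAIM (what is proved, stated in full; the proofs are below) =====
def Claim_equal_timegm_py : Prop := ∀ (a_o : Int) (mes : Int) (dia : Int) (hora : Int) (minuto : Int) (seg : Int), Dom_timegm_py a_o mes dia hora minuto seg → Pre_timegm_py a_o mes dia hora minuto seg → Spec_timegm_py a_o mes dia hora minuto seg (timegm_py a_o mes dia hora minuto seg)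

-- ===== LEMMAS AND PROOFS =====
-- A's epoch-anchored year term equals B's differenced days-before-year helper.
lemma year_term_eq (a : Int) :
    (a - 1970) * 365 + (PySem.Int.floordiv (a - 1969) 4 - PySem.Int.floordiv (a - 1901) 100 + PySem.Int.floordiv (a - 1601) 400)
    = dias_antes_del_anno a - dias_antes_del_anno 1970 := by
  simp only [dias_antes_del_anno,
    PySem.Int.floordiv_eq_ediv_of_pos (a := a - 1969) (show (0:Int) < 4 by norm_num),
    PySem.Int.floordiv_eq_ediv_of_pos (a := a - 1901) (show (0:Int) < 100 by norm_num),
    PySem.Int.floordiv_eq_ediv_of_pos (a := a - 1601) (show (0:Int) < 400 by norm_num),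
    PySem.Int.floordiv_eq_ediv_of_pos (a := a - 1) (show (0:Int) < 4 by norm_num),
    PySem.Int.floordiv_eq_ediv_of_pos (a := a - 1) (show (0:Int) < 100 by norm_num),
    PySem.Int.floordiv_eq_ediv_of_pos (a := a - 1) (show (0:Int) < 400 by norm_num),
    PySem.Int.floordiv_eq_ediv_of_pos (a := (1970:Int) - 1) (show (0:Int) < 4 by norm_num),
    PySem.Int.floordiv_eq_ediv_of_pos (a := (1970:Int) - 1) (show (0:Int) < 100 by norm_num),
    PySem.Int.floordiv_eq_ediv_of_pos (a := (1970:Int) - 1) (show (0:Int) < 400 by norm_num)]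
  omega

-- A's month-summing loop plus its leap-day branch equals B's day-of-year formula with leap correction.
lemma month_term_eq (mes : Int) (h : mes ≤ 13) (c : Prop) [Decidable c] (d0 : Int) :
    (if mes > 2 ∧ c then
       ((PySem.List.pyRange 1 mes 1).foldl
         (fun d m => d + PySem.List.pyGetD [(0:Int), 31, 28, 31, 30, 31, 30, 31, 31, 30, 31, 30, 31] m 0) d0) + 1
     else ((PySem.List.pyRange 1 mes 1).foldl
         (fun d m => d + PySem.List.pyGetD [(0:Int), 31, 28, 31, 30, 31, 30, 31, 31, 30, 31, 30, 31] m 0) d0))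
    = (if mes > 1 then
         (if mes > 2 then d0 + PySem.Int.floordiv (367 * mes - 362) 12 - (if c then 1 else 2)
          else d0 + PySem.Int.floordiv (367 * mes - 362) 12)
       else d0) := by
  by_cases h1 : mes ≤ 1
  · rw [PySem.List.pyRange_one_eq_nil h1]
    have h2 : ¬ mes > 2 := by omega
    have h3 : ¬ mes > 1 := by omega
    simp [h2, h3]
  · have h2 : 2 ≤ mes := by omega
    rw [PySem.List.foldl_add]
    by_cases hc : c <;>
      simp only [hc, and_true, and_false, if_false] <;>
      interval_cases mes <;>
      norm_num [PySem.List.pyRange_one, List.range_succ, List.map_cons, List.map_nil,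
        List.sum_cons, List.sum_nil, show Int.toNat 2 = 2 from rfl, show Int.toNat 3 = 3 from rfl, show Int.toNat 4 = 4 from rfl, show Int.toNat 5 = 5 from rfl, show Int.toNat 6 = 6 from rfl, show Int.toNat 7 = 7 from rfl, show Int.toNat 8 = 8 from rfl, show Int.toNat 9 = 9 from rfl, show Int.toNat 10 = 10 from rfl, show Int.toNat 11 = 11 from rfl, show Int.toNat 12 = 12 from rfl, Function.comp, PySem.List.pyGetD, PySem.List.pyGet?, PySem.List.pyIdx?,
        PySem.Int.floordiv_eq_ediv_of_pos (show (0:Int) < 12 by norm_num)] <;> omega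

-- ===== VERDICT (by name: the statement is the Claim_ definition above) =====
theorem timegm_py_spec : Claim_equal_timegm_py := by
  intro a_o mes dia hora minuto seg _ hpre
  have hm : mes ≤ 13 := hpre
  simp only [Spec_timegm_py, timegm_py, timegm_py_alt]
  rw [month_term_eq mes hm, year_term_eq]
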